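-- pv_equiv track=rewrite | github.com/promaaa/prism | src/utils/calculations.py | get_date_range_from_transactions
-- ===== SOURCE A (Python) =====
-- from typing import List, Dict, Any, Optional, Tuple
--
-- def get_date_range_from_transactions(
--     transactions: List[Dict[str, Any]],
-- ) -> Tuple[Optional[str], Optional[str]]:
--     """
--     Get the date range from a list of transactions.
--
--     Args:
--         transactions: List of transaction dictionaries
--
--     Returns:
--         Tuple[Optional[str], Optional[str]]: (min_date, max_date) or (None, None)
--     """
--     if not transactions:
--         return None, None
--
--     dates = [t.get("date") for t in transactions if t.get("date")]
--
--     if not dates: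
--         return None, None
--
--     return min(dates), max(dates)
-- ===== SOURCE B (Python) =====
-- def get_date_range_from_transactions(transactions):
--     """Single pass: maintain the running (min, max) pair of truthy dates."""
--     acc = None
--     for t in transactions:
--         d = t.get("date")
--         if not d:
--             continue
--         if acc is None:
--             acc = (d, d)
--         else:
--             acc = (d if d < acc[0] else acc[0], d if d > acc[1] else acc[1])
--     if acc is None:
--         return None, None
--     return acc[0], acc[1]
-- ===== Notes on version B (the rewrite author's own statement) =====
-- stated objective: alternative
-- what changed: Replaces the filter comprehension plus two separate min/max scans with a single traversal maintaining one optional (lo, hi) accumulator, with no intermediate dates list and no early-return on an empty input.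
import Mathlib
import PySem

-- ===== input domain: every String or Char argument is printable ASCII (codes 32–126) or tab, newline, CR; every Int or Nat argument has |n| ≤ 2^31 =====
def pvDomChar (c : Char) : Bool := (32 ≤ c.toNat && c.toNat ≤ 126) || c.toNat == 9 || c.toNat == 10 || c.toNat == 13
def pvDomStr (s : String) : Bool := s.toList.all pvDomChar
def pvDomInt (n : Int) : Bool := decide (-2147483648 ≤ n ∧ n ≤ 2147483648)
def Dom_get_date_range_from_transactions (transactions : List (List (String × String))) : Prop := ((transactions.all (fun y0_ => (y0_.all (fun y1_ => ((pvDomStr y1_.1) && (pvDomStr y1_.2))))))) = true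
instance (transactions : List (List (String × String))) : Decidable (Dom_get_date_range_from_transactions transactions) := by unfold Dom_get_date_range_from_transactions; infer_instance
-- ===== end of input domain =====

-- B fuses A's filter comprehension and separate min/max scans into one pass with an optional (lo, hi) accumulator (objective: alternative).


-- ===== PORT A =====
-- dates = [t.get("date") for t in transactions if t.get("date")] (truthy dates only, i.e. present and non-empty)
def pvDatesA (transactions : List (List (String × String))) : List String :=
  transactions.filterMap (fun t =>
    match (PySem.Dict.mk t).get? "date" with
    | none => none
    | some d => if d = "" then none else some d)

def get_date_range_from_transactions (transactions : List (List (String × String))) : Option String × Option String :=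
  if transactions = [] then (none, none)
  else
    let dates := pvDatesA transactions
    if dates = [] then (none, none)
    else (PySem.List.min? dates (fun x => x), PySem.List.max? dates (fun x => x))

-- ===== PORT B =====
-- one fold step: skip missing/empty dates, else start or update the (lo, hi) pair
def pvStepB (acc : Option (String × String)) (t : List (String × String)) : Option (String × String) :=
  match (PySem.Dict.mk t).get? "date" with
  | none => acc
  | some d =>
    if d = "" then acc
    else
      match acc with
      | none => some (d, d)
      | some (lo, hi) => some ((if d < lo then d else lo), (if hi < d then d else hi))

def get_date_range_from_transactions_alt (transactions : List (List (String × String))) : Option String × Option String :=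
  match transactions.foldl pvStepB none with
  | none => (none, none)
  | some (lo, hi) => (some lo, some hi)

-- ===== PRECONDITION & SPEC =====
def Spec_get_date_range_from_transactions (transactions : List (List (String × String))) (out : Option String × Option String) : Prop := out = get_date_range_from_transactions_alt transactions
instance (transactions : List (List (String × String))) (out : Option String × Option String) : Decidable (Spec_get_date_range_from_transactions transactions out) := by unfold Spec_get_date_range_from_transactions; infer_instance

-- ===== CLAIM (what is proved, stated in full; the proofs are below) =====
def Claim_equal_get_date_range_from_transactions : Prop := ∀ (transactions : List (List (String × String))), Dom_get_date_range_from_transactions transactions → Spec_get_date_range_from_transactions transactions (get_date_range_from_transactions transactions)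

-- ===== LEMMAS AND PROOFS =====

-- the step of B seen on the filtered dates list
def pvStepD (acc : Option (String × String)) (d : String) : Option (String × String) :=
  match acc with
  | none => some (d, d)
  | some (lo, hi) => some ((if d < lo then d else lo), (if hi < d then d else hi))

lemma foldB_eq_foldD (ts : List (List (String × String))) (acc : Option (String × String)) :
    ts.foldl pvStepB acc = (pvDatesA ts).foldl pvStepD acc := by
  induction ts generalizing acc with
  | nil => rfl
  | cons t ts ih =>
    simp only [List.foldl_cons, pvDatesA, List.filterMap_cons]
    cases h : (PySem.Dict.mk t).get? "date" with
    | none => simp [pvStepB, h, ih, pvDatesA]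
    | some d =>
      by_cases hd : d = "" <;>
        simp [pvStepB, h, hd, ih, pvDatesA, pvStepD, List.foldl_cons]

lemma foldD_some (ds : List String) (lo hi : String) :
    ds.foldl pvStepD (some (lo, hi)) = some (ds.foldl min lo, ds.foldl max hi) := by
  induction ds generalizing lo hi with
  | nil => rfl
  | cons d ds ih =>
    have h1 : (if d < lo then d else lo) = min lo d := by
      rcases lt_or_ge d lo with h | h
      · rw [if_pos h, min_eq_right h.le]
      · rw [if_neg (not_lt.mpr h), min_eq_left h]
    have h2 : (if hi < d then d else hi) = max hi d := by
      rcases lt_or_ge hi d with h | h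
      · rw [if_pos h, max_eq_right h.le]
      · rw [if_neg (not_lt.mpr h), max_eq_left h]
    rw [List.foldl_cons, show pvStepD (some (lo, hi)) d = some ((if d < lo then d else lo), (if hi < d then d else hi)) from rfl, h1, h2, ih, List.foldl_cons, List.foldl_cons]

-- ===== VERDICT (by name: the statement is the Claim_ definition above) =====
theorem get_date_range_from_transactions_spec : Claim_equal_get_date_range_from_transactions := by
  intro ts _
  show _ = _
  unfold get_date_range_from_transactions get_date_range_from_transactions_alt
  rw [foldB_eq_foldD]
  by_cases hts : ts = []
  · subst hts; rfl
  · rw [if_neg hts]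
    cases hd : pvDatesA ts with
    | nil => simp
    | cons d ds =>
      rw [if_neg (by simp)]
      simp only [List.foldl_cons, pvStepD, foldD_some,
        PySem.List.min?_id_cons, PySem.List.max?_id_cons]
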